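-- pv_equiv track=rewrite | github.com/DLR-SC/DataFinder | src/datafinder/gui/user/dialogs/search_dialog/search_query_editor.py | _determineParagraphStartPosition
-- ===== SOURCE A (Python) =====
-- def _determineParagraphStartPosition(splittedText, currentText):
--     """ Finds out the start of the paragraph that is currently changed. """
--
--     begin = 0
--     for paragraph in splittedText:
--         if paragraph != currentText:
--             begin += len(paragraph) + 1
--         else:
--             break
--     return begin
-- ===== SOURCE B (Python) =====
-- def _determineParagraphStartPosition(splittedText, currentText):
--     """ Finds out the start of the paragraph that is currently changed. """
--
--     try:
--         idx = splittedText.index(currentText)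
--     except ValueError:
--         idx = len(splittedText)
--     return sum(len(p) + 1 for p in splittedText[:idx])
-- ===== Notes on version B (the rewrite author's own statement) =====
-- stated objective: alternative
-- what changed: Replaces the single accumulate-and-break scan with two separate passes: find the index of the matching paragraph (falling back to the list length when absent), then sum len+1 over the prefix before it.
import Mathlib
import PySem

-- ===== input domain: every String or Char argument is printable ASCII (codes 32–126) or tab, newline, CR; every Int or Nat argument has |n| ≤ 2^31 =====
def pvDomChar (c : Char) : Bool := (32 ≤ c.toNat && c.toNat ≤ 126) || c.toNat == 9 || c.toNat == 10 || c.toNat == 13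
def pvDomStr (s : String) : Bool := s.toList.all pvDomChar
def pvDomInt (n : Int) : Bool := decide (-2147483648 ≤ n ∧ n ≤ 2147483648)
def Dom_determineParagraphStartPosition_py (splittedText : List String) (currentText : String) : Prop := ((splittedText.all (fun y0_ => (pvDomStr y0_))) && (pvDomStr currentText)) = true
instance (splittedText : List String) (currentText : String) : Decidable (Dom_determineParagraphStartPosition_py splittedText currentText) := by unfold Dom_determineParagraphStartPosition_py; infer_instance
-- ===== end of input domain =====

-- B replaces A's accumulate-and-break scan by a find-index pass followed by a sum over the prefix (alternative decomposition, same cost).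

-- ===== PORT A =====
-- loop with break, accumulator `begin`
def pvGoA (currentText : String) : List String → Int → Int
  | [], b => b
  | p :: rest, b => if p ≠ currentText then pvGoA currentText rest (b + PySem.Str.len p + 1) else b

def determineParagraphStartPosition_py (splittedText : List String) (currentText : String) : Int :=
  pvGoA currentText splittedText 0

-- ===== PORT B =====
def determineParagraphStartPosition_py_alt (splittedText : List String) (currentText : String) : Int :=
  ((splittedText.take ((PySem.List.index? splittedText currentText).getD splittedText.length)).map
    (fun p => PySem.Str.len p + 1)).sum

-- ===== PRECONDITION & SPEC =====
def Spec_determineParagraphStartPosition_py (splittedText : List String) (currentText : String) (out : Int) : Prop := out = determineParagraphStartPosition_py_alt splittedText currentText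
instance (splittedText : List String) (currentText : String) (out : Int) : Decidable (Spec_determineParagraphStartPosition_py splittedText currentText out) := by unfold Spec_determineParagraphStartPosition_py; infer_instance

-- ===== CLAIM (what is proved, stated in full; the proofs are below) =====
def Claim_equal_determineParagraphStartPosition_py : Prop := ∀ (splittedText : List String) (currentText : String), Dom_determineParagraphStartPosition_py splittedText currentText → Spec_determineParagraphStartPosition_py splittedText currentText (determineParagraphStartPosition_py splittedText currentText)

-- ===== LEMMAS AND PROOFS =====
theorem pvGoA_eq_alt (ct : String) (xs : List String) (b : Int) :
    pvGoA ct xs b = b + determineParagraphStartPosition_py_alt xs ct := by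
  induction xs generalizing b with
  | nil => simp [pvGoA, determineParagraphStartPosition_py_alt]
  | cons x rest ih =>
    unfold determineParagraphStartPosition_py_alt pvGoA
    by_cases hx : x = ct
    · subst hx
      rw [PySem.List.index?_cons_self]
      simp
    · rw [if_pos hx, ih, PySem.List.index?_cons_of_ne rest hx]
      unfold determineParagraphStartPosition_py_alt
      cases h : PySem.List.index? rest ct with
      | none => simp; ring
      | some k => simp; ring

theorem determineParagraphStartPosition_py_spec : Claim_equal_determineParagraphStartPosition_py := by
  intro xs ct _
  show determineParagraphStartPosition_py xs ct = _
  unfold determineParagraphStartPosition_py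
  rw [pvGoA_eq_alt]
  ring
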